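-- pv_equiv track=rewrite | github.com/JendaPlhak/math_in_python | KvagrsWork/4_task/basic_shapes.py | movePointsTowardsOrigin
-- ===== SOURCE A (Python) =====
-- def movePointsTowardsOrigin(points):
--
--     minX = points[0][0]
--     minY = points[0][1]
--     maxX = points[0][0]
--     maxY = points[0][1]
--
--     for point in points:
--         if minX > point[0]: minX = point[0]
--         if minY > point[1]: minY = point[1]
--         if maxX < point[0]: maxX = point[0]
--         if maxY < point[1]: maxY = point[1]
--
--     minA = min(minX, minY)
--
--     for point in points:
--         point[0] -= minX
--         point[1] -= minY
--
--     # determine the size of the canvas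
--     size = [ maxX - minX + 1, maxY - minY + 1]
--
--     return points, size
-- ===== SOURCE B (Python) =====
-- def movePointsTowardsOrigin(points):
--     # sort each coordinate projection; the extremes are the ends of the sorted lists
--     xs = sorted(p[0] for p in points)
--     ys = sorted(p[1] for p in points)
--     minX, maxX = xs[0], xs[-1]
--     minY, maxY = ys[0], ys[-1]
--     for point in points:
--         point[0] -= minX
--         point[1] -= minY
--     return points, [maxX - minX + 1, maxY - minY + 1]
-- ===== Notes on version B (the rewrite author's own statement) =====
-- stated objective: alternative
-- what changed: Replaces A's single-pass four-accumulator extreme-tracking loop by sorting the two coordinate projections and reading the extremes off the ends of the sorted lists (xs[0]/xs[-1]); the unused minA is dropped and the in-place shift loop is kept. Trades A's O(n) scan for O(n log n) sorting in exchange for a shorter, scan-free extreme computation.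
import Mathlib
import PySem

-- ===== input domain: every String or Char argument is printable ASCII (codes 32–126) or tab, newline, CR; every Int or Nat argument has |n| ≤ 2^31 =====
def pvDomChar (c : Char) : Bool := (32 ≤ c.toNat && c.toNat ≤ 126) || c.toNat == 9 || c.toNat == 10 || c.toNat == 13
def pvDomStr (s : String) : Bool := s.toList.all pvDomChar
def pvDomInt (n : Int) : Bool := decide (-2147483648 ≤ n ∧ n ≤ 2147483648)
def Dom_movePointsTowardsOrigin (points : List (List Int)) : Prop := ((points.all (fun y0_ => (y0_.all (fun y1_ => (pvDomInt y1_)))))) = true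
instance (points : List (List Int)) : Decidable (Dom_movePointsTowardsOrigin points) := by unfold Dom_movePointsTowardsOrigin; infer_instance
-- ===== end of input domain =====

-- B replaces A's single-pass four-accumulator extreme tracking by sorting the two coordinate projections
-- and taking their first/last elements; the in-place shift loop stays (equivalence is about the return value;
-- like A, B mutates the point lists it returns).


-- ===== PORT A =====
-- p[0]/p[1] ported as getD (exact on Pre_: every point has length ≥ 2, indices are literal and nonnegative)
def movePointsTowardsOrigin (points : List (List Int)) : List (List Int) × List Int :=
  let p0 := points.headD []
  let s := points.foldl (fun (s : Int × Int × Int × Int) point =>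
      let minX := if s.1 > point.getD 0 0 then point.getD 0 0 else s.1
      let minY := if s.2.1 > point.getD 1 0 then point.getD 1 0 else s.2.1
      let maxX := if s.2.2.1 < point.getD 0 0 then point.getD 0 0 else s.2.2.1
      let maxY := if s.2.2.2 < point.getD 1 0 then point.getD 1 0 else s.2.2.2
      (minX, minY, maxX, maxY))
    (p0.getD 0 0, p0.getD 1 0, p0.getD 0 0, p0.getD 1 0)
  -- minA = min(minX, minY) is computed by A but never used; omitted
  let shifted := points.map (fun point =>
      (point.set 0 (point.getD 0 0 - s.1)).set 1 (point.getD 1 0 - s.2.1))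
  (shifted, [s.2.2.1 - s.1 + 1, s.2.2.2 - s.2.1 + 1])

-- ===== PORT B =====
def movePointsTowardsOrigin_alt (points : List (List Int)) : List (List Int) × List Int :=
  let xs := PySem.List.sorted (points.map (fun p => p.getD 0 0)) (fun v => v) false
  let ys := PySem.List.sorted (points.map (fun p => p.getD 1 0)) (fun v => v) false
  let minX := (PySem.List.pyGet? xs 0).getD 0
  let maxX := (PySem.List.pyGet? xs (-1)).getD 0
  let minY := (PySem.List.pyGet? ys 0).getD 0
  let maxY := (PySem.List.pyGet? ys (-1)).getD 0
  let shifted := points.map (fun point =>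
      (point.set 0 (point.getD 0 0 - minX)).set 1 (point.getD 1 0 - minY))
  (shifted, [maxX - minX + 1, maxY - minY + 1])

-- ===== PRECONDITION & SPEC =====
-- Pre_ excludes exactly the inputs where A raises: an empty list (points[0] IndexError)
-- and points with fewer than two coordinates (point[0]/point[1] IndexError).
def Pre_movePointsTowardsOrigin (points : List (List Int)) : Prop :=
  points ≠ [] ∧ ∀ p ∈ points, 2 ≤ p.length
instance (points : List (List Int)) : Decidable (Pre_movePointsTowardsOrigin points) := by
  unfold Pre_movePointsTowardsOrigin; infer_instance
def pvWitness_movePointsTowardsOrigin : List (List Int) := [[3, 4], [1, 7, 9]]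
def Spec_movePointsTowardsOrigin (points : List (List Int)) (out : List (List Int) × List Int) : Prop := out = movePointsTowardsOrigin_alt points
instance (points : List (List Int)) (out : List (List Int) × List Int) : Decidable (Spec_movePointsTowardsOrigin points out) := by unfold Spec_movePointsTowardsOrigin; infer_instance

-- ===== CLAIM =====
def Claim_equal_movePointsTowardsOrigin : Prop := ∀ (points : List (List Int)), Dom_movePointsTowardsOrigin points → Pre_movePointsTowardsOrigin points → Spec_movePointsTowardsOrigin points (movePointsTowardsOrigin points)

-- ===== LEMMAS AND PROOFS =====

theorem pv_if_min (a x : Int) : (if a > x then x else a) = min a x := by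
  rw [min_def]; split_ifs <;> omega

theorem pv_if_max (a x : Int) : (if a < x then x else a) = max a x := by
  rw [max_def]; split_ifs <;> omega

-- A's 4-tuple fold splits into four independent folds over the projected coordinates.
theorem pv_fold_split (l : List (List Int)) (a b c d : Int) :
    l.foldl (fun (s : Int × Int × Int × Int) point =>
      let minX := if s.1 > point.getD 0 0 then point.getD 0 0 else s.1
      let minY := if s.2.1 > point.getD 1 0 then point.getD 1 0 else s.2.1
      let maxX := if s.2.2.1 < point.getD 0 0 then point.getD 0 0 else s.2.2.1
      let maxY := if s.2.2.2 < point.getD 1 0 then point.getD 1 0 else s.2.2.2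
      (minX, minY, maxX, maxY)) (a, b, c, d)
    = ((l.map (fun p => p.getD 0 0)).foldl min a,
       (l.map (fun p => p.getD 1 0)).foldl min b,
       (l.map (fun p => p.getD 0 0)).foldl max c,
       (l.map (fun p => p.getD 1 0)).foldl max d) := by
  induction l generalizing a b c d with
  | nil => rfl
  | cons p t ih =>
    simp only [List.foldl, List.map]
    rw [ih, pv_if_min, pv_if_min, pv_if_max, pv_if_max]

-- first element of the sorted list is the running minimum
theorem pv_sorted_first (x : Int) (t : List Int) :
    (PySem.List.pyGet? (PySem.List.sorted (x :: t) (fun v => v) false) 0).getD 0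
      = t.foldl min x := by
  have hperm := PySem.List.sorted_perm (x :: t) (fun v => v) false
  have hlen : (PySem.List.sorted (x :: t) (fun v => v) false).length = t.length + 1 := by
    simp [hperm.length_eq]
  have h0 : 0 < (PySem.List.sorted (x :: t) (fun v => v) false).length := by omega
  rw [show (PySem.List.pyGet? (PySem.List.sorted (x :: t) (fun v => v) false) 0)
      = some ((PySem.List.sorted (x :: t) (fun v => v) false)[0]) by
    simp [PySem.List.pyGet?, PySem.List.pyIdx?, hlen]]
  simp only [Option.getD_some]
  apply le_antisymm
  · rcases PySem.List.foldl_min_mem t x with h | h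
    · have hm : t.foldl min x ∈ x :: t := by rw [h]; exact List.mem_cons_self
      obtain ⟨j, hj, hje⟩ := List.getElem_of_mem (hperm.mem_iff.mpr hm)
      rw [← hje]; exact PySem.List.sorted_id_getElem_mono _ (Nat.zero_le j) hj
    · obtain ⟨j, hj, hje⟩ := List.getElem_of_mem (hperm.mem_iff.mpr (List.mem_cons_of_mem x h))
      rw [← hje]; exact PySem.List.sorted_id_getElem_mono _ (Nat.zero_le j) hj
  · have : (PySem.List.sorted (x :: t) (fun v => v) false)[0] ∈ x :: t :=
      hperm.mem_iff.mp (List.getElem_mem h0)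
    rcases List.mem_cons.mp this with h | h
    · rw [h]; exact (PySem.List.foldl_min_le t x).1
    · exact (PySem.List.foldl_min_le t x).2 _ h
  
-- last element of the sorted list is the running maximum
theorem pv_sorted_last (x : Int) (t : List Int) :
    (PySem.List.pyGet? (PySem.List.sorted (x :: t) (fun v => v) false) (-1)).getD 0
      = t.foldl max x := by
  have hperm := PySem.List.sorted_perm (x :: t) (fun v => v) false
  have hlen : (PySem.List.sorted (x :: t) (fun v => v) false).length = t.length + 1 := by
    simp [hperm.length_eq]
  have hlast : t.length < (PySem.List.sorted (x :: t) (fun v => v) false).length := by omega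
  rw [show (PySem.List.pyGet? (PySem.List.sorted (x :: t) (fun v => v) false) (-1))
      = some ((PySem.List.sorted (x :: t) (fun v => v) false)[t.length]) by
    simp [PySem.List.pyGet?, PySem.List.pyIdx?, hlen]]
  simp only [Option.getD_some]
  apply le_antisymm
  · have : (PySem.List.sorted (x :: t) (fun v => v) false)[t.length] ∈ x :: t :=
      hperm.mem_iff.mp (List.getElem_mem hlast)
    rcases List.mem_cons.mp this with h | h
    · rw [h]; exact (PySem.List.le_foldl_max t x).1
    · exact (PySem.List.le_foldl_max t x).2 _ h
  · rcases PySem.List.foldl_max_mem t x with h | h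
    · have hm : t.foldl max x ∈ x :: t := by rw [h]; exact List.mem_cons_self
      obtain ⟨j, hj, hje⟩ := List.getElem_of_mem (hperm.mem_iff.mpr hm)
      rw [← hje]
      exact PySem.List.sorted_id_getElem_mono _ (by omega : j ≤ t.length) hlast
    · obtain ⟨j, hj, hje⟩ := List.getElem_of_mem (hperm.mem_iff.mpr (List.mem_cons_of_mem x h))
      rw [← hje]
      exact PySem.List.sorted_id_getElem_mono _ (by omega : j ≤ t.length) hlast

-- ===== VERDICT =====
theorem movePointsTowardsOrigin_spec : Claim_equal_movePointsTowardsOrigin := by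
  intro points _ hpre
  obtain ⟨hne, _⟩ := hpre
  unfold Spec_movePointsTowardsOrigin
  obtain ⟨p0, t, rfl⟩ := List.exists_cons_of_ne_nil hne
  simp only [movePointsTowardsOrigin, movePointsTowardsOrigin_alt]
  rw [pv_fold_split]
  simp only [List.headD_cons, List.map_cons, List.foldl_cons, min_self, max_self,
    pv_sorted_first, pv_sorted_last]
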